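-- pv_equiv track=rewrite | github.com/simon-wilmes/rehabiliation-admission-scheduling | test2.py | generate_unique_tuples2
-- ===== SOURCE A (Python) =====
-- def generate_unique_tuples2(lists):
--     # Sort lists by their length and keep track of original indices
--     sorted_lists = sorted(enumerate(lists), key=lambda x: len(x[1]))
--     indices, sorted_lists = zip(*sorted_lists)
--
--     def backtrack(current_tuple, used_elements, depth):
--         # Base case: If the tuple is complete, reorder it and yield
--         if depth == len(sorted_lists):
--             # Reorder tuple to match the original list order
--             yield tuple(current_tuple[i] for i in indices)
--             return
--
--         # Iterate through the current list at 'depth'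
--         for num in sorted_lists[depth]:
--             if num not in used_elements:  # Check for duplicates
--                 # Include num in the current tuple and mark it as used
--                 current_tuple.append(num)
--                 used_elements.add(num)
--
--                 # Recur to the next depth
--                 yield from backtrack(current_tuple, used_elements, depth + 1)
--
--                 # Backtrack: remove num and unmark it
--                 current_tuple.pop()
--                 used_elements.remove(num)
--
--     # Start backtracking
--     return backtrack([], set(), 0)
-- ===== SOURCE B (Python) =====
-- def generate_unique_tuples2(lists):
--     # Same preamble as the original: sort by length, remember original indices
--     # (zip(*...) still raises ValueError on empty input).
--     sorted_lists = sorted(enumerate(lists), key=lambda x: len(x[1]))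
--     indices, sorted_lists = zip(*sorted_lists)
--
--     # Build the full cartesian product iteratively (lexicographic order),
--     # then keep only the all-distinct combos and reindex each one.
--     combos = [()]
--     for lst in sorted_lists:
--         combos = [c + (num,) for c in combos for num in lst]
--     return [tuple(c[i] for i in indices)
--             for c in combos if len(set(c)) == len(c)]
-- ===== Notes on version B (the rewrite author's own statement) =====
-- stated objective: alternative
-- what changed: Replaced the recursive used-set backtracking generator by an iterative build of the full cartesian product followed by a distinctness filter and reindex; same lexicographic output order.
-- outside the precondition, e.g. on generate_unique_tuples2([]): A raises ValueError, B raises ValueError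
import Mathlib
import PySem

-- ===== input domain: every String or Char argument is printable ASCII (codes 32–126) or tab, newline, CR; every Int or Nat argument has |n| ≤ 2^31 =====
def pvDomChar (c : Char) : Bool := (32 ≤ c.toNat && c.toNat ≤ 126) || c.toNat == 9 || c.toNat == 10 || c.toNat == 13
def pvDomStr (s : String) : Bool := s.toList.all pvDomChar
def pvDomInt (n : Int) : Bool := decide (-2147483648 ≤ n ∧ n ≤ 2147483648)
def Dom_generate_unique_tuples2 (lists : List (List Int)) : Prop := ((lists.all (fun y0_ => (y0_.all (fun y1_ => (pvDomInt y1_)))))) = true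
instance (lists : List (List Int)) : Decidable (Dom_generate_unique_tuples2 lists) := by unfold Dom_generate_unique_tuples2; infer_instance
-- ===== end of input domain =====

-- B replaces the recursive used-set backtracking generator by an iterative cartesian-product
-- build followed by a distinctness filter; same outputs in the same order (objective: alternative).
-- A returns a lazy generator; both are modelled by the list of produced tuples.

-- ===== PORT A =====
-- the recursive generator 'backtrack(current_tuple, used_elements, depth)'; depth indexing is
-- transcribed as structural recursion over the not-yet-visited sorted lists.
def pvBacktrackA (indices : List Int) : List (List Int) → List Int → PySem.Set Int → List (List Int)
  | [], cur, _ =>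
      [indices.map (fun i => (PySem.List.pyGet? cur i).getD 0)]
  | l :: ls, cur, used =>
      l.foldl (fun acc num =>
        if PySem.Set.contains used num then acc
        else acc ++ pvBacktrackA indices ls (cur ++ [num]) (PySem.Set.add used num)) []

def generate_unique_tuples2 (lists : List (List Int)) : List (List Int) :=
  let sl := PySem.List.sorted (PySem.List.enumerate lists) (fun x => (x.2.length : Int)) false
  let indices := sl.map (·.1)
  let sorted_lists := sl.map (·.2)
  pvBacktrackA indices sorted_lists [] PySem.Set.empty

-- ===== PORT B =====
def generate_unique_tuples2_alt (lists : List (List Int)) : List (List Int) :=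
  let sl := PySem.List.sorted (PySem.List.enumerate lists) (fun x => (x.2.length : Int)) false
  let indices := sl.map (·.1)
  let sorted_lists := sl.map (·.2)
  let combos := sorted_lists.foldl
    (fun combos lst => combos.flatMap (fun c => lst.map (fun num => c ++ [num]))) [[]]
  (combos.filter (fun c => PySem.Set.len (PySem.Set.ofList c) == (c.length : Int))).map
    (fun c => indices.map (fun i => (PySem.List.pyGet? c i).getD 0))

-- ===== PRECONDITION & SPEC =====
-- Pre_ excludes only the empty argument, on which both programs raise ValueError (zip(*[])).
def Pre_generate_unique_tuples2 (lists : List (List Int)) : Prop := lists ≠ []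
instance (lists : List (List Int)) : Decidable (Pre_generate_unique_tuples2 lists) := by
  unfold Pre_generate_unique_tuples2; infer_instance
def pvWitness_generate_unique_tuples2 : List (List Int) := [[1, 2], [3]]

def Spec_generate_unique_tuples2 (lists : List (List Int)) (out : List (List Int)) : Prop := out = generate_unique_tuples2_alt lists
instance (lists : List (List Int)) (out : List (List Int)) : Decidable (Spec_generate_unique_tuples2 lists out) := by unfold Spec_generate_unique_tuples2; infer_instance

-- ===== CLAIM (what is proved, stated in full; the proofs are below) =====
def Claim_equal_generate_unique_tuples2 : Prop := ∀ (lists : List (List Int)), Dom_generate_unique_tuples2 lists → Pre_generate_unique_tuples2 lists → Spec_generate_unique_tuples2 lists (generate_unique_tuples2 lists)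

-- ===== LEMMAS AND PROOFS =====

-- the right-nested cartesian product, in lexicographic order
def pvProd : List (List Int) → List (List Int)
  | [] => [[]]
  | l :: ls => l.flatMap (fun x => (pvProd ls).map (fun t => x :: t))

lemma pvFoldl_prod (ls : List (List Int)) : ∀ cs : List (List Int),
    ls.foldl (fun combos lst => combos.flatMap (fun c => lst.map (fun num => c ++ [num]))) cs
      = cs.flatMap (fun c => (pvProd ls).map (fun t => c ++ t)) := by
  induction ls with
  | nil => intro cs; simp [pvProd]
  | cons l ls ih =>
      intro cs
      simp only [List.foldl_cons, ih, pvProd, List.flatMap_assoc, List.map_flatMap,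
        List.flatMap_map, List.map_map]
      congr 1; funext c; congr 1; funext x
      simp [Function.comp, List.append_assoc]

lemma pvOfList_sublist (xs : List Int) : (PySem.Set.ofList xs).Sublist xs := by
  induction xs using List.reverseRecOn with
  | nil => simp [PySem.Set.ofList_nil]
  | append_singleton xs x ih =>
      rw [PySem.Set.ofList_append_singleton, PySem.Set.add_eq_ite]
      split
      · exact ih.trans (List.sublist_append_left xs [x])
      · exact ih.append (List.Sublist.refl [x])

lemma pvLen_ofList_iff (xs : List Int) :
    ((PySem.Set.len (PySem.Set.ofList xs) == (xs.length : Int)) = true) ↔ xs.Nodup := by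
  constructor
  · intro h
    have hlen : (PySem.Set.ofList xs).length = xs.length := by
      simpa [PySem.Set.len] using h
    have heq := (pvOfList_sublist xs).eq_of_length hlen
    exact heq ▸ PySem.Set.nodup_ofList xs
  · intro h
    simp [PySem.Set.len, PySem.Set.ofList_eq_self_of_nodup xs h]

-- one step: 'if p then acc else acc ++ g x' folded over l is a flatMap
lemma pvFoldl_if_append (l : List Int) (p : Int → Bool) (g : Int → List (List Int)) :
    l.foldl (fun acc num => if p num then acc else acc ++ g num) []
      = l.flatMap (fun num => if p num then [] else g num) := by
  have : (fun (acc : List (List Int)) num => if p num then acc else acc ++ g num)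
       = (fun acc num => acc ++ (if p num then [] else g num)) := by
    funext acc num; split <;> simp
  rw [this, PySem.List.foldl_append_eq_flatMap]
  simp

lemma pvBacktrack_eq (indices : List Int) : ∀ (ls : List (List Int)) (cur : List Int),
    cur.Nodup →
    pvBacktrackA indices ls cur cur
      = ((pvProd ls).filter (fun t => decide ((cur ++ t).Nodup))).map
          (fun t => indices.map (fun i => (PySem.List.pyGet? (cur ++ t) i).getD 0)) := by
  intro ls
  induction ls with
  | nil => intro cur h; simp [pvBacktrackA, pvProd, h]
  | cons l ls ih =>
      intro cur h
      have hcontains : ∀ num : Int, PySem.Set.contains cur num = decide (num ∈ cur) := by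
        intro num
        simp [PySem.Set.contains_eq_listContains]
      have step : pvBacktrackA indices (l :: ls) cur cur
          = l.foldl (fun acc num =>
              if decide (num ∈ cur) then acc
              else acc ++ pvBacktrackA indices ls (cur ++ [num]) (PySem.Set.add cur num)) [] := by
        simp only [pvBacktrackA]
        congr 1; funext acc num; rw [hcontains]
      rw [step, pvFoldl_if_append]
      have rhs : ((pvProd (l :: ls)).filter (fun t => decide ((cur ++ t).Nodup))).map
            (fun t => indices.map (fun i => (PySem.List.pyGet? (cur ++ t) i).getD 0))
          = l.flatMap (fun num =>
              (((pvProd ls).map (fun t => num :: t)).filter (fun t => decide ((cur ++ t).Nodup))).map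
                (fun t => indices.map (fun i => (PySem.List.pyGet? (cur ++ t) i).getD 0))) := by
        simp [pvProd, List.filter_flatMap, List.map_flatMap]
      rw [rhs]
      congr 1; funext num
      by_cases hm : num ∈ cur
      · have : ∀ t, (decide ((cur ++ num :: t).Nodup)) = false := by
          intro t
          simp only [decide_eq_false_iff_not]
          intro hn
          have := List.disjoint_of_nodup_append hn
          exact this hm (List.mem_cons_self)
        simp only [hm, decide_true, if_true, List.filter_map]
        rw [List.filter_eq_nil_iff.mpr (by intro t _; simp [Function.comp, this t])]
        simp
      · have hnodup' : (cur ++ [num]).Nodup := by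
          simp [List.nodup_append, h]
          intro a ha he
          exact hm (he ▸ ha)
        rw [if_neg (by simp [hm]), PySem.Set.add_of_not_mem hm, ih (cur ++ [num]) hnodup']
        simp [List.filter_map, List.map_map, Function.comp_def, List.append_assoc]
-- ===== VERDICT (by name: the statement is the Claim_ definition above) =====
theorem generate_unique_tuples2_spec : Claim_equal_generate_unique_tuples2 := by
  intro lists _ _
  unfold Spec_generate_unique_tuples2 generate_unique_tuples2 generate_unique_tuples2_alt
  simp only
  rw [pvFoldl_prod, show (PySem.Set.empty : PySem.Set Int) = ([] : List Int) from rfl,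
    pvBacktrack_eq _ _ [] List.nodup_nil]
  simp only [List.nil_append, List.flatMap_cons, List.flatMap_nil, List.append_nil,
    List.map_id']
  congr 1
  apply List.filter_congr
  intro t _
  rw [Bool.eq_iff_iff, decide_eq_true_iff]
  exact (pvLen_ofList_iff t).symm
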